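-- pv_equiv track=rewrite | github.com/PStahl/project_euler | p021_amicable_numbers.py | amicable_pairs_xrange
-- ===== SOURCE A (Python) =====
-- cache = {}
--
-- def sum_divisors(n):
--     if n in cache:
--         return cache[n]
--
--     s = 0
--     for i in range(1, n):
--         if n % i == 0:
--             s += i
--
--     cache[n] = s
--     return s
--
-- def amicable_pairs_xrange(low, high):
--     L = [sum_divisors(i) for i in range(low, high + 1)]
--     result = 0
--     for i in range(high - low + 1):
--         ind = L[i]
--         if i + low < ind and low <= ind and ind <= high and L[ind - low] == i + low:
--             result += i + low + ind
--
--     return result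
-- ===== SOURCE B (Python) =====
-- def amicable_pairs_xrange(low, high):
--     # Segmented sieve: accumulate sigma(m) (sum of ALL divisors) for every m in the
--     # window [lo, high] by iterating divisors d up to sqrt(high) and walking their
--     # multiples, adding each divisor pair (d, m // d) once.  Values below 2 have
--     # proper-divisor sum 0 and can never satisfy a < s, so the window starts at 2.
--     lo = max(low, 2)
--     if high < lo:
--         return 0
--     sd = [0] * (high - lo + 1)
--     d = 1
--     while d * d <= high:
--         base = max(lo, d * d)
--         start = base + (-base) % d  # least multiple of d that is >= max(lo, d*d)
--         for m in range(start, high + 1, d):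
--             sd[m - lo] += d
--             q = m // d
--             if q != d:
--                 sd[m - lo] += q
--         d += 1
--     result = 0
--     for a in range(lo, high + 1):
--         s = sd[a - lo] - a
--         if a < s and s <= high and sd[s - lo] - s == a:
--             result += a + s
--     return result
-- ===== Notes on version B (the rewrite author's own statement) =====
-- stated objective: alternative
-- what changed: B replaces A's per-number trial-division divisor loop over a precomputed list by a segmented sieve over the window [max(low,2), high]: each divisor d up to sqrt(high) walks its multiples once, adding the pair (d, m//d).
import Mathlib
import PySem

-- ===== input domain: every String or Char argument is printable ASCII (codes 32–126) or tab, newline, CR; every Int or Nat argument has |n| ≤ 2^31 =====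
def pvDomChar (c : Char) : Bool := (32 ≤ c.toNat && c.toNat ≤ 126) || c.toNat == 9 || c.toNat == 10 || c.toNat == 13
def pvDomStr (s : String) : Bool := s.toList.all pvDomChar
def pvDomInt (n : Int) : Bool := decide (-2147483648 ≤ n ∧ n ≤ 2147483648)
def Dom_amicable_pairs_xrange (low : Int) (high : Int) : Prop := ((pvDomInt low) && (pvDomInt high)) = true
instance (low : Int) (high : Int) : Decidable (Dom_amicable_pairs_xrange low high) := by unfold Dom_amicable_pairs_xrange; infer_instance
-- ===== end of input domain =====

-- B computes the window's divisor sums with a segmented sieve (each divisor d up to sqrt(high)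
-- walks its multiples once, adding the pair d, m // d) instead of A's per-number trial-division
-- loop; A's module-level cache is a pure memoization and is ported as a pure function.

-- ===== PORT A =====
-- sum_divisors: s = 0; for i in range(1, n): if n % i == 0: s += i  (cache = pure memo, omitted)
def pySumDivisors (n : Int) : Int :=
  (PySem.List.pyRange 1 n 1).foldl (fun s i => if PySem.Int.mod n i = 0 then s + i else s) 0

def amicable_pairs_xrange (low : Int) (high : Int) : Int :=
  let L := (PySem.List.pyRange low (high + 1) 1).map pySumDivisors
  -- both L-indexings are always in range in Python (0 ≤ i < len L; the second is guarded by
  -- low <= ind <= high before it is evaluated), so pyGetD is exact here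
  (PySem.List.pyRange 0 (high - low + 1) 1).foldl
    (fun result i =>
      let ind := PySem.List.pyGetD L i 0
      if i + low < ind ∧ low ≤ ind ∧ ind ≤ high ∧ PySem.List.pyGetD L (ind - low) 0 = i + low
      then result + (i + low + ind) else result) 0

-- ===== PORT B =====
-- body of B's inner 'for m in range(start, high + 1, d)' loop:
-- sd[m - lo] += d; q = m // d; if q != d: sd[m - lo] += q  (both indexings in range: lo <= m <= high)
def pvF (lo d : Int) (sd : List Int) (m : Int) : List Int :=
  let sd1 := PySem.List.pySetD sd (m - lo) (PySem.List.pyGetD sd (m - lo) 0 + d)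
  let q := PySem.Int.floordiv m d
  if q ≠ d then PySem.List.pySetD sd1 (m - lo) (PySem.List.pyGetD sd1 (m - lo) 0 + q) else sd1

-- one round of B's outer loop: walk the multiples of d inside the window
def sieveInner (lo high d : Int) (sd : List Int) : List Int :=
  let base := max lo (d * d)
  let start := base + PySem.Int.mod (-base) d
  (PySem.List.pyRange start (high + 1) d).foldl (pvF lo d) sd

-- B's outer 'while d * d <= high' loop
def sieveLoop (lo high : Int) (d : Nat) (sd : List Int) : List Int :=
  if h : (d : Int) * (d : Int) ≤ high then
    sieveLoop lo high (d + 1) (sieveInner lo high (d : Int) sd)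
  else sd
termination_by high.toNat + 1 - d
decreasing_by
  have hdd : d ≤ d * d := by
    cases d with
    | zero => simp
    | succ k => exact Nat.le_mul_of_pos_left _ (Nat.succ_pos k)
  have h1 : (d : Int) ≤ high := le_trans (by exact_mod_cast hdd) h
  omega

-- segmented sieve over the window [max(low, 2), high]; sd[k] accumulates sigma(lo + k)
def amicable_pairs_xrange_alt (low : Int) (high : Int) : Int :=
  let lo := max low 2
  if high < lo then 0
  else
    let sd := sieveLoop lo high 1 (List.replicate (high - lo + 1).toNat 0)
    (PySem.List.pyRange lo (high + 1) 1).foldl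
      (fun result a =>
        let s := PySem.List.pyGetD sd (a - lo) 0 - a
        if a < s ∧ s ≤ high ∧ PySem.List.pyGetD sd (s - lo) 0 - s = a then result + (a + s)
        else result) 0

-- ===== PRECONDITION & SPEC =====
def Spec_amicable_pairs_xrange (low : Int) (high : Int) (out : Int) : Prop := out = amicable_pairs_xrange_alt low high
instance (low : Int) (high : Int) (out : Int) : Decidable (Spec_amicable_pairs_xrange low high out) := by unfold Spec_amicable_pairs_xrange; infer_instance

-- ===== CLAIM (what is proved, stated in full; the proofs are below) =====
def Claim_equal_amicable_pairs_xrange : Prop := ∀ (low : Int) (high : Int), Dom_amicable_pairs_xrange low high → Spec_amicable_pairs_xrange low high (amicable_pairs_xrange low high)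

-- ===== LEMMAS AND PROOFS =====

-- A's divisor sum as a Nat-valued Finset sum
def pvAsum (m : Nat) : Nat := ∑ d ∈ Finset.Ico 1 m, (if d ∣ m then d else 0)

-- B's sieve contribution to sigma(m), from trial divisor d upward
def pvBsum (m d : Nat) : Nat :=
  ∑ j ∈ Finset.Ico d (m + 1), (if j ∣ m ∧ j * j ≤ m then j + (if j * j ≠ m then m / j else 0) else 0)

lemma pv_foldl_ite_add (p : Int → Prop) [DecidablePred p] (l : List Int) (c : Int) :
    l.foldl (fun s i => if p i then s + i else s) c
      = c + (l.map (fun i => if p i then i else 0)).sum := by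
  induction l generalizing c with
  | nil => simp
  | cons x xs ih => by_cases hx : p x <;> simp [hx, ih, add_assoc]

lemma pv_div_self_iff (m d : Nat) (hd : 0 < d) (hdvd : d ∣ m) : (m / d = d ↔ m = d * d) := by
  constructor
  · intro h
    conv_lhs => rw [← Nat.div_mul_cancel hdvd, h]
  · intro h
    rw [h, Nat.mul_div_cancel_left _ hd]

lemma pySumDivisors_eq_Asum (m : Nat) (hm : 2 ≤ m) :
    pySumDivisors (m : Int) = (pvAsum m : Int) := by
  unfold pySumDivisors
  rw [pv_foldl_ite_add, PySem.List.pyRange_one, List.map_map]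
  have h1 : ((m : Int) - 1).toNat = m - 1 := by omega
  rw [h1, zero_add]
  have h2 : ((List.range (m-1)).map ((fun i => if PySem.Int.mod (m:Int) i = 0 then i else 0) ∘ fun k => (1:Int) + ↑k)).sum
      = ∑ k ∈ Finset.range (m-1), ((if (1+k) ∣ m then ((1+k:Nat):Int) else 0)) := by
    congr 1
    apply List.map_congr_left
    intro k _
    simp only [Function.comp]
    have : (1 + (k:Int)) = ((1+k : Nat) : Int) := by push_cast; ring
    rw [this]
    simp only [PySem.Int.mod_eq_zero_iff_dvd, Int.natCast_dvd_natCast]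

  rw [h2]
  unfold pvAsum
  rw [Finset.sum_Ico_eq_sum_range]
  push_cast
  simp

lemma Asum_eq_Bsum (m : Nat) (hm : 2 ≤ m) : pvAsum m = 1 + pvBsum m 2 := by
  classical
  have hm0 : m ≠ 0 := by omega
  set P : Finset Nat := (Finset.Ico 1 m).filter (· ∣ m) with hP
  set Q : Finset Nat := (Finset.Ico 2 (m+1)).filter (fun j => j ∣ m ∧ j * j ≤ m) with hQ
  set Q' : Finset Nat := Q.filter (fun j => j * j ≠ m) with hQ'
  have hA : pvAsum m = ∑ d ∈ P, d := by
    rw [hP, Finset.sum_filter]; rfl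
  have hB : pvBsum m 2 = (∑ j ∈ Q, j) + ∑ j ∈ Q', m / j := by
    rw [hQ', Finset.sum_filter]
    rw [hQ, Finset.sum_filter, Finset.sum_filter]
    rw [← Finset.sum_add_distrib]
    unfold pvBsum
    apply Finset.sum_congr rfl
    intro j _
    by_cases h : j ∣ m ∧ j * j ≤ m <;> simp [h]
  have hsplit : (∑ d ∈ P, d)
      = (∑ d ∈ P.filter (fun d => d * d ≤ m), d) + ∑ d ∈ P.filter (fun d => ¬ d * d ≤ m), d :=
    (Finset.sum_filter_add_sum_filter_not P _ _).symm
  have hsmall : P.filter (fun d => d * d ≤ m) = insert 1 Q := by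
    ext x
    simp only [hP, hQ, Finset.mem_filter, Finset.mem_Ico, Finset.mem_insert]
    constructor
    · rintro ⟨⟨⟨hx1, hxm⟩, hdvd⟩, hsq⟩
      by_cases h1 : x = 1
      · exact Or.inl h1
      · exact Or.inr ⟨⟨by omega, by omega⟩, hdvd, hsq⟩
    · rintro (rfl | ⟨⟨hx2, hxm1⟩, hdvd, hsq⟩)
      · exact ⟨⟨⟨le_rfl, by omega⟩, one_dvd m⟩, by omega⟩
      · have h2x : 2 * x ≤ x * x := Nat.mul_le_mul_right x hx2
        exact ⟨⟨⟨by omega, by omega⟩, hdvd⟩, hsq⟩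
  have h1Q : (1 : Nat) ∉ Q := by
    simp [hQ]
  have hlarge : (∑ d ∈ P.filter (fun d => ¬ d * d ≤ m), d) = ∑ j ∈ Q', m / j := by
    apply Finset.sum_nbij' (i := fun d => m / d) (j := fun j => m / j)
    · intro a ha
      simp only [hP, Finset.mem_filter, Finset.mem_Ico] at ha
      obtain ⟨⟨⟨ha1, ham⟩, hdvd⟩, hsq⟩ := ha
      obtain ⟨e, he⟩ := hdvd
      have hea : m / a = e := by rw [he, Nat.mul_div_cancel_left _ (by omega)]
      have he2 : 2 ≤ e := by
        rcases Nat.lt_or_ge e 2 with h | h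
        · interval_cases e <;> omega
        · exact h
      have hlt : e < a := by nlinarith
      simp only [hQ', hQ, Finset.mem_filter, Finset.mem_Ico, hea]
      refine ⟨⟨⟨he2, by nlinarith⟩, ⟨a, by rw [he]; ring⟩, by nlinarith⟩, by nlinarith⟩
    · intro j hj
      simp only [hQ', hQ, Finset.mem_filter, Finset.mem_Ico] at hj
      obtain ⟨⟨⟨hj2, hjm⟩, hdvd, hsq⟩, hne⟩ := hj
      obtain ⟨e, he⟩ := hdvd
      have hej : m / j = e := by rw [he, Nat.mul_div_cancel_left _ (by omega)]
      have hjj : j * j < m := lt_of_le_of_ne hsq hne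
      have hjlt : j < e := by nlinarith
      simp only [hP, Finset.mem_filter, Finset.mem_Ico, hej]
      refine ⟨⟨⟨by omega, by nlinarith⟩, ⟨j, by rw [he]; ring⟩⟩, by nlinarith⟩
    · intro a ha
      simp only [hP, Finset.mem_filter, Finset.mem_Ico] at ha
      exact Nat.div_div_self ha.1.2 hm0
    · intro j hj
      simp only [hQ', hQ, Finset.mem_filter, Finset.mem_Ico] at hj
      exact Nat.div_div_self hj.1.2.1 hm0
    · intro a ha
      simp only [hP, Finset.mem_filter, Finset.mem_Ico] at ha
      exact (Nat.div_div_self ha.1.2 hm0).symm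
  rw [hA, hsplit, hsmall, Finset.sum_insert h1Q, hlarge, hB]
  ring


-- key lemma: the two divisor-sum routines agree everywhere

-- per-divisor contribution to sigma(m)
def pvContrib (m j : Nat) : Nat :=
  if j ∣ m ∧ j * j ≤ m then j + (if j * j ≠ m then m / j else 0) else 0

lemma pvBsum_eq_sum_contrib (m d : Nat) :
    pvBsum m d = ∑ j ∈ Finset.Ico d (m + 1), pvContrib m j := rfl

-- sieve length/value lemmas (to fill)
lemma pv_len_pvF (lo d : Int) (sd : List Int) (m : Int) : (pvF lo d sd m).length = sd.length := by
  unfold pvF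
  simp only []
  split <;> simp [PySem.List.length_pySetD]

lemma pv_len_fold_pvF (lo d : Int) (ms : List Int) (sd : List Int) :
    (ms.foldl (pvF lo d) sd).length = sd.length := by
  induction ms generalizing sd with
  | nil => rfl
  | cons m ms ih => rw [List.foldl_cons, ih, pv_len_pvF]

lemma pv_fold_pvF_getD (lo high d : Int) (ms : List Int) (hnd : ms.Nodup)
    (hms : ∀ m ∈ ms, lo ≤ m ∧ m ≤ high) (sd : List Int)
    (hlen : sd.length = (high - lo + 1).toNat) (k : Nat) (hk : k < sd.length) :
    PySem.List.pyGetD (ms.foldl (pvF lo d) sd) (k : Int) 0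
      = PySem.List.pyGetD sd (k : Int) 0
        + (if (lo + (k : Int)) ∈ ms
           then d + (if PySem.Int.floordiv (lo + (k : Int)) d ≠ d
                     then PySem.Int.floordiv (lo + (k : Int)) d else 0)
           else 0) := by
  induction ms generalizing sd with
  | nil => simp
  | cons m ms ih =>
    obtain ⟨hml, hmh⟩ := hms m List.mem_cons_self
    have hmnot : m ∉ ms := (List.nodup_cons.mp hnd).1
    rw [List.foldl_cons]
    have hlen1 : (pvF lo d sd m).length = sd.length := pv_len_pvF lo d sd m
    rw [ih (List.nodup_cons.mp hnd).2 (fun x hx => hms x (List.mem_cons_of_mem m hx))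
        (pvF lo d sd m) (hlen1.trans hlen) (hlen1 ▸ hk)]
    have hj : m - lo = (((m - lo).toNat : Nat) : Int) := by omega
    have hjlen : (m - lo).toNat < sd.length := by omega
    have hF : PySem.List.pyGetD (pvF lo d sd m) (k : Int) 0
        = if k = (m - lo).toNat
          then PySem.List.pyGetD sd (k : Int) 0 + d
                 + (if PySem.Int.floordiv m d ≠ d then PySem.Int.floordiv m d else 0)
          else PySem.List.pyGetD sd (k : Int) 0 := by
      unfold pvF
      simp only []
      rw [hj]
      simp only [Int.toNat_natCast]
      by_cases hq : PySem.Int.floordiv m d ≠ d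
      · by_cases hkj : k = (m - lo).toNat
        · rw [if_pos hq,
              PySem.List.pyGetD_pySetD_natCast _ _ k _ 0
                (by rw [PySem.List.length_pySetD]; exact hjlen), if_pos hkj,
              PySem.List.pyGetD_pySetD_natCast sd _ _ _ 0 hjlen, if_pos rfl, if_pos hkj, if_pos hq,
              hkj]
        · rw [if_pos hq,
              PySem.List.pyGetD_pySetD_natCast _ _ k _ 0
                (by rw [PySem.List.length_pySetD]; exact hjlen), if_neg hkj,
              PySem.List.pyGetD_pySetD_natCast sd _ k _ 0 hjlen, if_neg hkj, if_neg hkj]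
      · by_cases hkj : k = (m - lo).toNat
        · rw [if_neg hq, PySem.List.pyGetD_pySetD_natCast sd _ k _ 0 hjlen, if_pos hkj, if_pos hkj,
              if_neg hq, hkj]
          ring
        · rw [if_neg hq, PySem.List.pyGetD_pySetD_natCast sd _ k _ 0 hjlen, if_neg hkj, if_neg hkj]
    rw [hF]
    by_cases hkj : k = (m - lo).toNat
    · have hm' : lo + (k : Int) = m := by omega
      rw [if_pos hkj]
      have hnot : (lo + (k : Int)) ∉ ms := by rw [hm']; exact hmnot
      have hmem : (lo + (k : Int)) ∈ m :: ms := by rw [hm']; exact List.mem_cons_self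
      rw [if_neg hnot, if_pos hmem]
      simp only [hm']
      ring
    · have hm' : lo + (k : Int) ≠ m := by omega
      rw [if_neg hkj]
      by_cases hmem : (lo + (k : Int)) ∈ ms
      · rw [if_pos hmem, if_pos (List.mem_cons_of_mem m hmem)]
      · have hnot : (lo + (k : Int)) ∉ m :: ms := by simp [hm', hmem]
        rw [if_neg hmem, if_neg hnot]

lemma pv_dvd_sieve_start (lo d : Int) (hd : 0 < d) :
    d ∣ (max lo (d * d) + PySem.Int.mod (-(max lo (d * d))) d) := by
  have h := PySem.Int.floordiv_mul_add_mod (-(max lo (d * d))) d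
  exact ⟨-(PySem.Int.floordiv (-(max lo (d * d))) d), by linarith⟩

lemma pv_mem_sieve_range (lo high d m : Int) (hd : 0 < d) (hm : lo ≤ m) (hmh : m ≤ high) :
    (m ∈ PySem.List.pyRange (max lo (d * d) + PySem.Int.mod (-(max lo (d * d))) d) (high + 1) d)
      ↔ (d ∣ m ∧ d * d ≤ m) := by
  have hr0 : 0 ≤ PySem.Int.mod (-(max lo (d * d))) d := PySem.Int.mod_nonneg _ hd
  have hrd : PySem.Int.mod (-(max lo (d * d))) d < d := PySem.Int.mod_lt _ hd
  have hds : d ∣ (max lo (d * d) + PySem.Int.mod (-(max lo (d * d))) d) := pv_dvd_sieve_start lo d hd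
  rw [PySem.List.mem_pyRange_iff_of_pos hd]
  constructor
  · rintro ⟨h1, h2, h3⟩
    have hdm : d ∣ m := by
      have := dvd_add h3 hds
      simpa using this
    refine ⟨hdm, ?_⟩
    have : d * d ≤ max lo (d * d) := le_max_right _ _
    omega
  · rintro ⟨hdm, hsq⟩
    have hbase : max lo (d * d) ≤ m := max_le hm hsq
    refine ⟨?_, by omega, dvd_sub hdm hds⟩
    obtain ⟨t, ht⟩ := dvd_sub hdm hds
    have htpos : 0 ≤ t := by
      by_contra hneg
      push_neg at hneg
      have : t ≤ -1 := by omega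
      have : d * t ≤ d * (-1) := by
        exact mul_le_mul_of_nonneg_left this (by omega)
      omega
    have : 0 ≤ d * t := mul_nonneg (by omega) htpos
    omega

lemma pv_nodup_pyRange_pos (a b s : Int) (h : 0 < s) : (PySem.List.pyRange a b s).Nodup := by
  rw [PySem.List.pyRange_of_pos a b h]
  apply List.Nodup.map
  · intro x y hxy
    simp only at hxy
    have h1 : s * (x : Int) = s * y := by omega
    have h2 := mul_left_cancel₀ (by omega : (s : Int) ≠ 0) h1
    exact_mod_cast h2
  · exact List.nodup_range

lemma pvBsum_succ_bot (m d : Nat) (hd : 1 ≤ d) : pvBsum m d = pvContrib m d + pvBsum m (d + 1) := by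
  by_cases hdm : d < m + 1
  · rw [pvBsum_eq_sum_contrib, pvBsum_eq_sum_contrib]
    exact Finset.sum_eq_sum_Ico_succ_bot hdm _
  · have h1 : Finset.Ico d (m + 1) = ∅ := Finset.Ico_eq_empty (by omega)
    have h2 : Finset.Ico (d + 1) (m + 1) = ∅ := Finset.Ico_eq_empty (by omega)
    have h3 : pvContrib m d = 0 := by
      unfold pvContrib
      have hno : ¬ (d ∣ m ∧ d * d ≤ m) := by
        rintro ⟨_, hsq⟩
        have : d ≤ d * d := Nat.le_mul_of_pos_left _ (by omega)
        omega
      simp [hno]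
    rw [pvBsum_eq_sum_contrib, pvBsum_eq_sum_contrib, h1, h2, h3]
    simp

lemma pv_contrib_cast (m d : Nat) (hd : 1 ≤ d) :
    (if (d : Int) ∣ (m : Int) ∧ (d : Int) * (d : Int) ≤ (m : Int)
     then (d : Int) + (if PySem.Int.floordiv (m : Int) (d : Int) ≠ (d : Int)
                       then PySem.Int.floordiv (m : Int) (d : Int) else 0)
     else 0) = ((pvContrib m d : Nat) : Int) := by
  unfold pvContrib
  rw [PySem.Int.floordiv_natCast]
  by_cases hc : d ∣ m ∧ d * d ≤ m
  · rw [if_pos ⟨Int.natCast_dvd_natCast.mpr hc.1, by exact_mod_cast hc.2⟩, if_pos hc]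
    have hiff : (((m / d : Nat) : Int) ≠ (d : Int)) ↔ (d * d ≠ m) := by
      rw [Ne, Int.natCast_inj, pv_div_self_iff m d (by omega) hc.1]
      omega
    by_cases hsq : d * d ≠ m
    · rw [if_pos (hiff.mpr hsq), if_pos hsq]
      push_cast
      ring
    · rw [if_neg (by simpa using hiff.not.mpr (by simpa using hsq)), if_neg hsq]
      push_cast
      ring
  · have hno : ¬ ((d : Int) ∣ (m : Int) ∧ (d : Int) * (d : Int) ≤ (m : Int)) := by
      rintro ⟨h1, h2⟩
      exact hc ⟨Int.natCast_dvd_natCast.mp h1, by exact_mod_cast h2⟩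
    rw [if_neg hno, if_neg hc]
    simp

lemma pv_len_sieveInner (lo high d : Int) (sd : List Int) :
    (sieveInner lo high d sd).length = sd.length := by
  unfold sieveInner
  simp only []
  exact pv_len_fold_pvF lo d _ sd

lemma pv_sieveInner_getD (lo high : Int) (d : Nat) (hd : 1 ≤ d) (hlo : 2 ≤ lo) (sd : List Int)
    (hlen : sd.length = (high - lo + 1).toNat) (k : Nat) (hk : k < sd.length) :
    PySem.List.pyGetD (sieveInner lo high (d : Int) sd) (k : Int) 0
      = PySem.List.pyGetD sd (k : Int) 0 + ((pvContrib (lo + (k : Int)).toNat d : Nat) : Int) := by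
  have hdpos : (0 : Int) < (d : Int) := by exact_mod_cast hd
  have hkh : lo + (k : Int) ≤ high := by
    rw [hlen] at hk
    omega
  have hkl : lo ≤ lo + (k : Int) := by omega
  unfold sieveInner
  simp only []
  rw [pv_fold_pvF_getD lo high (d : Int) _ (pv_nodup_pyRange_pos _ _ _ hdpos)
        (fun x hx => by
          have hx' := (PySem.List.mem_pyRange_iff_of_pos hdpos x).mp hx
          have hr0 : 0 ≤ PySem.Int.mod (-(max lo ((d : Int) * d))) d := PySem.Int.mod_nonneg _ hdpos
          have hb : lo ≤ max lo ((d : Int) * d) := le_max_left _ _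
          exact ⟨by omega, by omega⟩)
        sd hlen k hk]
  rw [if_congr (pv_mem_sieve_range lo high (d : Int) (lo + (k : Int)) hdpos hkl hkh) rfl rfl]
  have hcast : lo + (k : Int) = (((lo + (k : Int)).toNat : Nat) : Int) := by omega
  rw [show (lo + (k : Int)) = (((lo + (k : Int)).toNat : Nat) : Int) from hcast]
  simp only [Int.toNat_natCast]
  rw [pv_contrib_cast _ d hd]

lemma pv_sieveLoop_getD (lo high : Int) (hlo : 2 ≤ lo) :
    ∀ (fuel d : Nat) (sd : List Int), high.toNat + 1 - d ≤ fuel → 1 ≤ d →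
      sd.length = (high - lo + 1).toNat →
      ∀ k : Nat, k < sd.length →
        PySem.List.pyGetD (sieveLoop lo high d sd) (k : Int) 0
          = PySem.List.pyGetD sd (k : Int) 0 + ((pvBsum (lo + (k : Int)).toNat d : Nat) : Int) := by
  intro fuel
  induction fuel with
  | zero =>
    intro d sd hfuel hd1 hlen k hk
    have hdd : d ≤ d * d := Nat.le_mul_of_pos_left _ (by omega)
    have hg : ¬ ((d : Int) * (d : Int) ≤ high) := by
      intro hle
      have h1 : ((d * d : Nat) : Int) ≤ high := by push_cast; exact hle
      have h2 : ((d : Nat) : Int) ≤ ((d * d : Nat) : Int) := by exact_mod_cast hdd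
      omega
    rw [sieveLoop, dif_neg hg]
    have hkh : lo + (k : Int) ≤ high := by rw [hlen] at hk; omega
    have hz : pvBsum (lo + (k : Int)).toNat d = 0 := by
      rw [pvBsum_eq_sum_contrib]
      have he : Finset.Ico d ((lo + (k : Int)).toNat + 1) = ∅ := Finset.Ico_eq_empty (by omega)
      rw [he, Finset.sum_empty]
    rw [hz]
    simp
  | succ fuel ih =>
    intro d sd hfuel hd1 hlen k hk
    rw [sieveLoop]
    by_cases hg : (d : Int) * (d : Int) ≤ high
    · rw [dif_pos hg]
      have hdd : d ≤ d * d := Nat.le_mul_of_pos_left _ (by omega)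
      have hdh : ((d : Nat) : Int) ≤ high := by
        have h2 : ((d : Nat) : Int) ≤ ((d * d : Nat) : Int) := by exact_mod_cast hdd
        have h3 : ((d * d : Nat) : Int) ≤ high := by push_cast; exact hg
        omega
      have hlen' : (sieveInner lo high (d : Int) sd).length = sd.length :=
        pv_len_sieveInner lo high (d : Int) sd
      rw [ih (d + 1) _ (by omega) (by omega) (hlen'.trans hlen) k (by omega)]
      rw [pv_sieveInner_getD lo high d hd1 hlo sd hlen k hk]
      rw [pvBsum_succ_bot _ d hd1]
      push_cast
      ring
    · rw [dif_neg hg]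
      have hkh : lo + (k : Int) ≤ high := by rw [hlen] at hk; omega
      have hddm : (lo + (k : Int)).toNat < d * d := by
        have h3 : ¬ (((d * d : Nat) : Int) ≤ high) := by push_cast; exact hg
        omega
      have hz : pvBsum (lo + (k : Int)).toNat d = 0 := by
        rw [pvBsum_eq_sum_contrib]
        apply Finset.sum_eq_zero
        intro j hj
        simp only [Finset.mem_Ico] at hj
        have h1 : d * d ≤ j * j := Nat.mul_le_mul hj.1 hj.1
        unfold pvContrib
        have hno : ¬ (j ∣ (lo + (k : Int)).toNat ∧ j * j ≤ (lo + (k : Int)).toNat) := by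
          rintro ⟨_, hsq⟩
          omega
        simp [hno]
      rw [hz]
      simp

-- the sieved window entry is exactly A's divisor sum plus the value itself
lemma pv_sd_entry (lo high a : Int) (hlo : 2 ≤ lo) (ha : lo ≤ a) (hah : a ≤ high) :
    PySem.List.pyGetD (sieveLoop lo high 1 (List.replicate (high - lo + 1).toNat 0)) (a - lo) 0
      = pySumDivisors a + a := by
  have hm2 : 2 ≤ a.toNat := by omega
  have hk : a - lo = (((a - lo).toNat : Nat) : Int) := by omega
  have hlen : (List.replicate (high - lo + 1).toNat (0 : Int)).length = (high - lo + 1).toNat :=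
    List.length_replicate
  have hkn : (a - lo).toNat < (List.replicate (high - lo + 1).toNat (0 : Int)).length := by
    rw [hlen]
    omega
  rw [hk, pv_sieveLoop_getD lo high hlo high.toNat 1 _ (by omega) le_rfl hlen _ hkn]
  have hm : lo + (((a - lo).toNat : Nat) : Int) = a := by omega
  simp only [hm]
  have hrep : PySem.List.pyGetD (List.replicate (high - lo + 1).toNat (0 : Int))
      (((a - lo).toNat : Nat) : Int) 0 = 0 := by
    rw [PySem.List.pyGetD_natCast]
    simp only [List.getD_eq_getElem?_getD, List.getElem?_replicate]
    split <;> rfl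
  rw [hrep, pvBsum_succ_bot _ 1 le_rfl]
  have hcon : pvContrib a.toNat 1 = 1 + a.toNat := by
    unfold pvContrib
    rw [if_pos ⟨one_dvd _, by omega⟩, if_pos (by omega), Nat.div_one]
  have hAs := Asum_eq_Bsum a.toNat hm2
  have hps : pySumDivisors a = ((pvAsum a.toNat : Nat) : Int) := by
    rw [show a = ((a.toNat : Nat) : Int) from by omega]
    exact pySumDivisors_eq_Asum a.toNat hm2
  rw [hcon, hps]
  have ha' : ((a.toNat : Nat) : Int) = a := by omega
  push_cast
  omega

lemma pySumDivisors_lt_two (a : Int) (ha : a < 2) : pySumDivisors a = 0 := by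
  unfold pySumDivisors
  rw [PySem.List.pyRange_one_eq_nil (by omega)]
  rfl

lemma pv_foldl_skip (high : Int) (l : List Int) (c : Int) (h : ∀ x ∈ l, x < 2) :
    l.foldl (fun result a =>
        if a < pySumDivisors a ∧ pySumDivisors a ≤ high ∧ pySumDivisors (pySumDivisors a) = a
        then result + (a + pySumDivisors a) else result) c = c := by
  induction l generalizing c with
  | nil => rfl
  | cons x xs ih =>
    have hx : x < 2 := h x (List.mem_cons_self)
    have h0 : pySumDivisors x = 0 := pySumDivisors_lt_two x hx
    have h00 : pySumDivisors (0 : Int) = 0 := pySumDivisors_lt_two 0 (by omega)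
    simp only [List.foldl_cons, h0]
    rw [if_neg (by rintro ⟨h1, _, h3⟩; rw [h00] at h3; omega)]
    exact ih c (fun y hy => h y (List.mem_cons_of_mem x hy))

-- A's fold, re-expressed as a fold over the values low..high
lemma pv_A_as_values (low high : Int) :
    amicable_pairs_xrange low high
      = (PySem.List.pyRange low (high + 1) 1).foldl
          (fun result a =>
            if a < pySumDivisors a ∧ pySumDivisors a ≤ high ∧ pySumDivisors (pySumDivisors a) = a
            then result + (a + pySumDivisors a) else result) 0 := by
  unfold amicable_pairs_xrange
  simp only []
  rw [PySem.List.pyRange_one 0 (high - low + 1), PySem.List.pyRange_one low (high + 1)]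
  have hN : (high - low + 1 - 0).toNat = (high + 1 - low).toNat := by omega
  rw [hN, List.foldl_map, List.foldl_map]
  apply PySem.List.foldl_congr_mem
  intro acc k hk
  have hk' : k < (high + 1 - low).toNat := List.mem_range.mp hk
  simp only [zero_add]
  rw [← PySem.List.pyRange_one low (high + 1)]
  rw [PySem.List.pyGetD_map_pyRange_one pySumDivisors low (high + 1) k 0 hk']
  by_cases hb : low + (k : Int) < pySumDivisors (low + (k : Int)) ∧ pySumDivisors (low + (k : Int)) ≤ high
  · set s := pySumDivisors (low + (k : Int)) with hs
    have hlo : (0 : Int) ≤ s - low := by omega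
    have hcast : s - low = (((s - low).toNat : Nat) : Int) := by omega
    have hk2 : (s - low).toNat < (high + 1 - low).toNat := by omega
    rw [hcast, PySem.List.pyGetD_map_pyRange_one pySumDivisors low (high + 1) (s - low).toNat 0 hk2]
    have harg : low + (((s - low).toNat : Nat) : Int) = s := by omega
    rw [harg]
    have hcond : ((k : Int) + low < s ∧ low ≤ s ∧ s ≤ high ∧ pySumDivisors s = (k : Int) + low)
        ↔ (low + (k : Int) < s ∧ s ≤ high ∧ pySumDivisors s = low + (k : Int)) := by
      constructor
      · rintro ⟨h1, _, h3, h4⟩; exact ⟨by omega, h3, by omega ⟩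
      · rintro ⟨h1, h2, h3⟩; exact ⟨by omega, by omega, h2, by omega⟩
    by_cases hc : low + (k : Int) < s ∧ s ≤ high ∧ pySumDivisors s = low + (k : Int)
    · rw [if_pos (hcond.mpr hc), if_pos hc]
      ring
    · rw [if_neg (fun h => hc (hcond.mp h)), if_neg hc]
  · rw [if_neg (by intro h; exact hb ⟨by omega, h.2.2.1⟩), if_neg (by intro h; exact hb ⟨h.1, h.2.1⟩)]


-- B's fold equals the same value-fold over lo..high
lemma pv_B_as_values (low high : Int) :
    amicable_pairs_xrange_alt low high
      = (PySem.List.pyRange low (high + 1) 1).foldl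
          (fun result a =>
            if a < pySumDivisors a ∧ pySumDivisors a ≤ high ∧ pySumDivisors (pySumDivisors a) = a
            then result + (a + pySumDivisors a) else result) 0 := by
  unfold amicable_pairs_xrange_alt
  simp only []
  by_cases hcase : high < max low 2
  · rw [if_pos hcase]
    symm
    rcases le_or_gt (high + 1) low with hhl | hhl
    · rw [PySem.List.pyRange_one_eq_nil (by omega)]
      rfl
    · have h2 : high < 2 := by
        rcases max_choice low 2 with h | h <;> rw [h] at hcase <;> omega
      exact pv_foldl_skip high _ 0 (fun x hx => by
        have := (PySem.List.mem_pyRange_one.mp hx).2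
        omega)
  · rw [if_neg hcase]
    have hl2 : low ≤ max low 2 := le_max_left low 2
    have hlo2 : (2 : Int) ≤ max low 2 := le_max_right low 2
    have hext : (PySem.List.pyRange low (high + 1) 1).foldl
          (fun result a =>
            if a < pySumDivisors a ∧ pySumDivisors a ≤ high ∧ pySumDivisors (pySumDivisors a) = a
            then result + (a + pySumDivisors a) else result) 0
        = (PySem.List.pyRange (max low 2) (high + 1) 1).foldl
          (fun result a =>
            if a < pySumDivisors a ∧ pySumDivisors a ≤ high ∧ pySumDivisors (pySumDivisors a) = a
            then result + (a + pySumDivisors a) else result) 0 := by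
      rcases max_choice low 2 with h | h
      · rw [h]
      · rw [h]
        rw [PySem.List.pyRange_one_append low 2 (high + 1) (by omega : low ≤ 2) (by omega),
            List.foldl_append,
            pv_foldl_skip high _ 0 (fun x hx => (PySem.List.mem_pyRange_one.mp hx).2)]
    rw [hext]
    apply PySem.List.foldl_congr_mem
    intro acc x hx
    obtain ⟨hx1, hx2⟩ := PySem.List.mem_pyRange_one.mp hx
    rw [pv_sd_entry (max low 2) high x hlo2 hx1 (by omega)]
    simp only [add_sub_cancel_right]
    by_cases hb : x < pySumDivisors x ∧ pySumDivisors x ≤ high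
    · have hsl : max low 2 ≤ pySumDivisors x := by omega
      rw [pv_sd_entry (max low 2) high (pySumDivisors x) hlo2 hsl hb.2]
      simp only [add_sub_cancel_right]
    · rw [if_neg (fun h => hb ⟨h.1, h.2.1⟩), if_neg (fun h => hb ⟨h.1, h.2.1⟩)]

theorem amicable_main (low high : Int) :
    amicable_pairs_xrange low high = amicable_pairs_xrange_alt low high := by
  rw [pv_A_as_values, pv_B_as_values]

-- ===== VERDICT (by name: the statement is the Claim_ definition above) =====
theorem amicable_pairs_xrange_spec : Claim_equal_amicable_pairs_xrange := by
  intro low high _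
  unfold Spec_amicable_pairs_xrange
  exact amicable_main low high
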